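-- pv_equiv track=rewrite | github.com/renanthera/crunch | analyzers/helper.py | flatten_event_data
-- ===== SOURCE A (Python) =====
-- def flatten_event_data(event_data, event_data_base):
--   return {
--     key: [
--       value
--       for report_code in event_data.values()
--       for fight_data in report_code.values()
--       for source_key, elements in fight_data.items()
--       if isinstance(elements, list)
--       if source_key == key and source_key in event_data_base.keys()
--       for value in elements
--     ]
--     for key in event_data_base.keys()
--   }
-- ===== SOURCE B (Python) =====
-- def flatten_event_data(event_data, event_data_base):
--   buckets = {key: [] for key in event_data_base.keys()}
--   for report_code in event_data.values():
--     for fight_data in report_code.values():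
--       for source_key, elements in fight_data.items():
--         if isinstance(elements, list) and source_key in buckets:
--           buckets[source_key].extend(elements)
--   return buckets
-- ===== Notes on version B (the rewrite author's own statement) =====
-- stated objective: faster
-- what changed: A rescans the whole nested event_data once per base key (K nested comprehension passes); B makes a single pass over event_data, extending per-key buckets pre-initialized from event_data_base's keys.
import Mathlib
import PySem

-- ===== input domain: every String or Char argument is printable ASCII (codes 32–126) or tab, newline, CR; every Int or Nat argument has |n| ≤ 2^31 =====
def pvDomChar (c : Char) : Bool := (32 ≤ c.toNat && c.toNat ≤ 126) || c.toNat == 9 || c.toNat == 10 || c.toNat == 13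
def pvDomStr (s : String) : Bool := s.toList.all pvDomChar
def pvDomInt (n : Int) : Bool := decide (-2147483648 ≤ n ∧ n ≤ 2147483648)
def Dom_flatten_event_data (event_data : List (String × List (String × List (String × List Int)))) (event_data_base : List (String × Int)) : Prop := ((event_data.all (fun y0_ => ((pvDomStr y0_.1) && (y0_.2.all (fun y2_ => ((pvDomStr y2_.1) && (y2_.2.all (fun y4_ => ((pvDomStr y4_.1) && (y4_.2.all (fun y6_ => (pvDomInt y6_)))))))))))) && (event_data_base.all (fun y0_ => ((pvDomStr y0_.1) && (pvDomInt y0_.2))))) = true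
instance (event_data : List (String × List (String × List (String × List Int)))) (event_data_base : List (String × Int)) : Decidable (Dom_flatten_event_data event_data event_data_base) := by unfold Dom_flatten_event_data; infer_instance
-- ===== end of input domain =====

-- B replaces A's per-key rescan of all events (O(K·N)) by one pass over the events
-- filling per-key buckets initialized from event_data_base's keys (O(N)); objective: faster.

-- ===== PORT A =====
-- A: for each key of event_data_base, one full scan of the nested event_data collecting
-- the element lists whose source_key equals that key (and is a base key).
def flatten_event_data (event_data : List (String × List (String × List (String × List Int)))) (event_data_base : List (String × Int)) : List (String × List Int) :=
  let edD := PySem.Dict.ofList event_data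
  let edbD := PySem.Dict.ofList event_data_base
  edbD.keys.map (fun key =>
    (key, edD.values.flatMap (fun report_code =>
      (PySem.Dict.ofList report_code).values.flatMap (fun fight_data =>
        (PySem.Dict.ofList fight_data).items.flatMap (fun p =>
          -- 'isinstance(elements, list)' is always true at this type
          if p.1 == key && edbD.keys.contains p.1 then p.2 else [])))))

-- ===== PORT B =====
-- B: initialize a bucket per base key, then a single pass over the events extending buckets.
def flatten_event_data_alt (event_data : List (String × List (String × List (String × List Int)))) (event_data_base : List (String × Int)) : List (String × List Int) :=
  let edbD := PySem.Dict.ofList event_data_base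
  let init : PySem.Dict String (List Int) :=
    edbD.keys.foldl (fun d k => d.insert k ([] : List Int)) PySem.Dict.empty
  let final : PySem.Dict String (List Int) :=
    (PySem.Dict.ofList event_data).values.foldl (fun d report_code =>
      (PySem.Dict.ofList report_code).values.foldl (fun d fight_data =>
        (PySem.Dict.ofList fight_data).items.foldl (fun d p =>
          -- 'isinstance(elements, list)' is always true at this type
          if d.contains p.1 then d.modify p.1 [] (· ++ p.2) else d) d) d) init
  final.items

-- ===== PRECONDITION & SPEC =====
def Spec_flatten_event_data (event_data : List (String × List (String × List (String × List Int)))) (event_data_base : List (String × Int)) (out : List (String × List Int)) : Prop := out = flatten_event_data_alt event_data event_data_base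
instance (event_data : List (String × List (String × List (String × List Int)))) (event_data_base : List (String × Int)) (out : List (String × List Int)) : Decidable (Spec_flatten_event_data event_data event_data_base out) := by unfold Spec_flatten_event_data; infer_instance

-- ===== CLAIM (what is proved, stated in full; the proofs are below) =====
def Claim_equal_flatten_event_data : Prop := ∀ (event_data : List (String × List (String × List (String × List Int)))) (event_data_base : List (String × Int)), Dom_flatten_event_data event_data event_data_base → Spec_flatten_event_data event_data event_data_base (flatten_event_data event_data event_data_base)

-- ===== LEMMAS AND PROOFS =====

-- the single-pass update step of B
def pvStep (d : PySem.Dict String (List Int)) (p : String × List Int) : PySem.Dict String (List Int) :=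
  if d.contains p.1 then d.modify p.1 [] (· ++ p.2) else d

-- the flattened stream of (source_key, elements) pairs both programs traverse
def pvStream (event_data : List (String × List (String × List (String × List Int)))) : List (String × List Int) :=
  (PySem.Dict.ofList event_data).values.flatMap (fun report_code =>
    (PySem.Dict.ofList report_code).values.flatMap (fun fight_data =>
      (PySem.Dict.ofList fight_data).items))

theorem pvStep_contains (d : PySem.Dict String (List Int)) (p : String × List Int) (k : String) :
    (pvStep d p).contains k = d.contains k := by
  unfold pvStep
  split_ifs with h
  · rw [PySem.Dict.contains_modify]
    by_cases hk : k = p.1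
    · subst hk; simp [h]
    · simp [hk]
  · rfl

theorem pvFold_keys (S : List (String × List Int)) (d : PySem.Dict String (List Int)) :
    (S.foldl pvStep d).keys = d.keys := by
  induction S generalizing d with
  | nil => rfl
  | cons p S ih =>
    rw [List.foldl_cons, ih]
    unfold pvStep
    split_ifs with h
    · rw [PySem.Dict.keys_modify, PySem.Dict.keys_insert_of_contains _ _ h]
    · rfl

theorem pvFold_getD (S : List (String × List Int)) (d : PySem.Dict String (List Int)) (k : String)
    (hk : d.contains k = true) :
    (S.foldl pvStep d).getD k [] =
      d.getD k [] ++ (S.filter (fun p => p.1 == k)).flatMap (fun p => p.2) := by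
  induction S generalizing d with
  | nil => simp
  | cons p S ih =>
    rw [List.foldl_cons]
    by_cases hpk : p.1 = k
    · subst hpk
      have hstep : pvStep d p = d.modify p.1 [] (· ++ p.2) := by
        unfold pvStep; simp [hk]
      rw [hstep, ih _ (by rw [PySem.Dict.contains_modify]; simp [hk])]
      simp [PySem.Dict.getD_modify_self]
    · have hcontains : (pvStep d p).contains k = true := by rw [pvStep_contains]; exact hk
      rw [ih _ hcontains]
      have hgd : (pvStep d p).getD k [] = d.getD k [] := by
        unfold pvStep
        split_ifs with h
        · exact PySem.Dict.getD_modify_of_ne _ _ _ (Ne.symm hpk)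
        · rfl
      rw [hgd]
      simp [hpk]

-- flatMap with an 'if c then f x else []' body is a filter-then-flatMap
theorem pvFlatMap_if {α β : Type} (S : List α) (c : α → Bool) (f : α → List β) :
    S.flatMap (fun x => if c x then f x else []) = (S.filter c).flatMap f := by
  induction S with
  | nil => rfl
  | cons x S ih =>
    by_cases h : c x <;> simp [List.flatMap_cons, h, ih]

-- a foldl over a flatMap is the nested foldl
theorem pvFoldl_flatMap {α β γ : Type} (l : List α) (g : α → List β) (f : γ → β → γ) (init : γ) :
    (l.flatMap g).foldl f init = l.foldl (fun acc x => (g x).foldl f acc) init := by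
  induction l generalizing init with
  | nil => rfl
  | cons x l ih => simp [List.flatMap_cons, List.foldl_append, ih]

-- a flatMap of a flatMap flattens
theorem pvFlatMap_assoc {α β γ : Type} (l : List α) (g : α → List β) (f : β → List γ) :
    l.flatMap (fun x => (g x).flatMap f) = (l.flatMap g).flatMap f := by
  induction l with
  | nil => rfl
  | cons x l ih => simp [List.flatMap_cons, ih]

-- the initial buckets dict: one empty bucket per base key
theorem pvInit_items (keys : List String) (hnd : keys.Nodup) :
    (keys.foldl (fun d k => d.insert k ([] : List Int)) PySem.Dict.empty).items
      = keys.map (fun k => (k, ([] : List Int))) := by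
  have := PySem.Dict.items_foldl_insert_fresh keys (fun k => k) (fun _ => ([] : List Int))
    PySem.Dict.empty (by intro a _; rfl) (by rw [List.map_id']; exact hnd)
  exact this

-- ===== VERDICT (by name: the statement is the Claim_ definition above) =====
theorem flatten_event_data_spec : Claim_equal_flatten_event_data := by
  intro event_data event_data_base _
  simp only [Spec_flatten_event_data, flatten_event_data, flatten_event_data_alt]
  set edbD := PySem.Dict.ofList event_data_base with hedbD
  set init : PySem.Dict String (List Int) :=
    edbD.keys.foldl (fun d k => d.insert k ([] : List Int)) PySem.Dict.empty with hinit
  have hndk : edbD.keys.Nodup := PySem.Dict.nodup_keys_ofList _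
  have hinit_items : init.items = edbD.keys.map (fun k => (k, ([] : List Int))) :=
    pvInit_items _ hndk
  have hinit_keys : init.keys = edbD.keys := by
    show init.items.map Prod.fst = _
    rw [hinit_items, List.map_map]
    exact List.map_id' _
  -- B's nested foldl is the fold of pvStep over the flattened stream
  have hfold :
      (PySem.Dict.ofList event_data).values.foldl (fun d report_code =>
        (PySem.Dict.ofList report_code).values.foldl (fun d fight_data =>
          (PySem.Dict.ofList fight_data).items.foldl (fun d p =>
            if d.contains p.1 then d.modify p.1 [] (· ++ p.2) else d) d) d) init
      = (pvStream event_data).foldl pvStep init := by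
    unfold pvStream
    rw [pvFoldl_flatMap]
    congr 1
    funext acc rc
    rw [pvFoldl_flatMap]
    rfl
  rw [hfold]
  set final := (pvStream event_data).foldl pvStep init with hfinal
  have hfinal_keys : final.keys = edbD.keys := by rw [hfinal, pvFold_keys, hinit_keys]
  have hfinal_nd : final.keys.Nodup := by rw [hfinal_keys]; exact hndk
  rw [PySem.Dict.items_eq_map_keys final hfinal_nd [], hfinal_keys]
  apply List.map_congr_left
  intro k hkmem
  have hcont : init.contains k = true := by
    rw [PySem.Dict.contains_iff_mem_keys, hinit_keys]; exact hkmem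
  have hinitD : init.getD k [] = [] := by
    refine PySem.Dict.getD_of_mem_items init ?_ (by rw [hinit_keys]; exact hndk) []
    rw [hinit_items]
    exact List.mem_map_of_mem hkmem
  have hbaseC : edbD.keys.contains k = true := by
    simpa using hkmem
  have hcond : ∀ p : String × List Int,
      (if p.1 == k && edbD.keys.contains p.1 then p.2 else [])
        = (if p.1 == k then p.2 else []) := by
    intro p
    by_cases hp : p.1 = k
    · subst hp
      have hm : p.1 ∈ edbD.keys := hkmem
      simp [hm]
    · simp [hp]
  have hA :
      (PySem.Dict.ofList event_data).values.flatMap (fun report_code =>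
        (PySem.Dict.ofList report_code).values.flatMap (fun fight_data =>
          (PySem.Dict.ofList fight_data).items.flatMap (fun p =>
            if p.1 == k && edbD.keys.contains p.1 then p.2 else [])))
      = ((pvStream event_data).filter (fun p => p.1 == k)).flatMap (fun p => p.2) := by
    unfold pvStream
    have h1 := funext (fun rc : List (String × List (String × List Int)) =>
      pvFlatMap_assoc (PySem.Dict.ofList rc).values (fun fd => (PySem.Dict.ofList fd).items)
        (fun p => if p.1 == k && edbD.keys.contains p.1 then p.2 else []))
    rw [h1, pvFlatMap_assoc, funext hcond, pvFlatMap_if]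
  rw [hA, hfinal, pvFold_getD _ _ _ hcont, hinitD, List.nil_append]
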